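-- pv_equiv track=rewrite | github.com/iRatG/signal-mind | analytics/generate_report.py | score_histogram
-- ===== SOURCE A (Python) =====
-- from collections import defaultdict
--
-- def score_histogram(tels):
--     buckets = defaultdict(int)
--     for t in tels:
--         s = t.get("signal_score") or 0
--         b = (s // 10) * 10
--         buckets[b] += 1
--     xs = list(range(0, 110, 10))
--     return xs, [buckets[x] for x in xs]
-- ===== SOURCE B (Python) =====
-- def score_histogram(tels):
--     xs = list(range(0, 110, 10))
--     counts = [sum(1 for t in tels if ((t.get("signal_score") or 0) // 10) * 10 == x)
--               for x in xs]
--     return xs, counts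
-- ===== Notes on version B (the rewrite author's own statement) =====
-- stated objective: alternative
-- what changed: Replaces A's single pass that accumulates a defaultdict histogram table with a table-free per-bucket rescan: for each of the 11 fixed bucket labels B counts matching telemetry records directly, so no intermediate mapping is built or queried.
import Mathlib
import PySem

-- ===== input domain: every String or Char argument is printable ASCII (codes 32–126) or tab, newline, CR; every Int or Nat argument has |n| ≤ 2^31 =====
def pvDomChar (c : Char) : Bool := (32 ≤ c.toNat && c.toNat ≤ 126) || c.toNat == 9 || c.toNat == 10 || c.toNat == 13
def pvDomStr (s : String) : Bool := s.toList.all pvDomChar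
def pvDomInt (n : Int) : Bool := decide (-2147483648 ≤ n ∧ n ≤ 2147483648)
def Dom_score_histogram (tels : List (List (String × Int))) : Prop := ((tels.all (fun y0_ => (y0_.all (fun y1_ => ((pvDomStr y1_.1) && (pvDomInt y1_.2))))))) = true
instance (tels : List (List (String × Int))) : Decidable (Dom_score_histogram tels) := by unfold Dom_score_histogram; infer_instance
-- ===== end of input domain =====

-- ===== PORT A =====
-- One honest line: B drops A's defaultdict histogram table and instead counts each of the
-- 11 fixed bucket labels by rescanning the records (alternative decomposition, same results).

-- t.get("signal_score") or 0 : first-match lookup; `or 0` maps the falsy value 0 (and None) to 0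
-- (shared accessor: both Pythons read the score the same way)
def pvScore (t : List (String × Int)) : Int :=
  match (PySem.Dict.mk t).get? "signal_score" with
  | some v => if v == 0 then 0 else v
  | none => 0

def score_histogram (tels : List (List (String × Int))) : List Int × List Int :=
  let buckets : PySem.Dict Int Int :=
    tels.foldl (fun d t =>
      let s := pvScore t
      let b := PySem.Int.floordiv s 10 * 10
      d.modify b 0 (· + 1)) PySem.Dict.empty
  let xs := PySem.List.pyRange 0 110 10
  -- [buckets[x] for x in xs]: on a defaultdict the read yields the count, 0 if absent
  (xs, xs.map (fun x => buckets.getD x 0))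

-- ===== PORT B =====
def score_histogram_alt (tels : List (List (String × Int))) : List Int × List Int :=
  let xs := PySem.List.pyRange 0 110 10
  -- sum(1 for t in tels if ((t.get(..) or 0)//10)*10 == x)  =  count of records in bucket x
  let counts := xs.map (fun x =>
    ((tels.countP (fun t => PySem.Int.floordiv (pvScore t) 10 * 10 == x)) : Int))
  (xs, counts)

-- ===== PRECONDITION & SPEC =====
def Spec_score_histogram (tels : List (List (String × Int))) (out : List Int × List Int) : Prop := out = score_histogram_alt tels
instance (tels : List (List (String × Int))) (out : List Int × List Int) : Decidable (Spec_score_histogram tels out) := by unfold Spec_score_histogram; infer_instance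

-- ===== CLAIM (what is proved, stated in full; the proofs are below) =====
def Claim_equal_score_histogram : Prop := ∀ (tels : List (List (String × Int))), Dom_score_histogram tels → Spec_score_histogram tels (score_histogram tels)

-- ===== LEMMAS AND PROOFS =====
theorem pvBucketCount (tels : List (List (String × Int))) (x : Int) :
    (tels.foldl (fun d t => d.modify (PySem.Int.floordiv (pvScore t) 10 * 10) 0 (· + 1))
      (PySem.Dict.empty : PySem.Dict Int Int)).getD x 0
      = ((tels.countP (fun t => PySem.Int.floordiv (pvScore t) 10 * 10 == x)) : Int) := by
  have h : tels.foldl (fun d t => d.modify (PySem.Int.floordiv (pvScore t) 10 * 10) 0 (· + 1))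
      (PySem.Dict.empty : PySem.Dict Int Int)
      = (tels.map (fun t => PySem.Int.floordiv (pvScore t) 10 * 10)).foldl
          (fun d b => d.modify b 0 (· + 1)) PySem.Dict.empty := by
    rw [List.foldl_map]
  rw [h, PySem.Dict.getD_foldl_modify_add_one, PySem.Dict.getD_empty, List.count_eq_countP,
    List.countP_map]
  simp [Function.comp_def, BEq.comm]

-- ===== VERDICT (by name: the statement is the Claim_ definition above) =====
theorem score_histogram_spec : Claim_equal_score_histogram := by
  intro tels _
  unfold Spec_score_histogram score_histogram score_histogram_alt
  simp only []
  refine Prod.ext rfl ?_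
  simp only [List.map_inj_left]
  intro x _
  exact pvBucketCount tels x
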